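-- pv_equiv track=rewrite | github.com/jusaviin/adventOfCode | 2024/day14/bathroomSecurityChecker.py | checkChristmasTreeShape
-- ===== SOURCE A (Python) =====
-- def checkChristmasTreeShape(robotLocations):
--
--     # Christmas tree shape means that there is a single robot in the top row, three below that, five below that and so on
--     # Christmas tree can be of any size, as long as it follows that pattern
--     # Overlap of robots does not matter, as long as together they will form a Christmas tree shape
--
--     # Start by removing duplicates and sorting the robot locations by the y-coordinate
--     sortedRobotLocations = list(set(robotLocations))
--     sortedRobotLocations = sorted(sortedRobotLocations, key=lambda point: (point[1], point[0]))
--     distinctLocations = len(sortedRobotLocations)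
--
--     # Check if the count of different locations matches expected counts from the Christmas tree
--     treeGrower = 3
--     treeSize = 1
--     outline = []
--
--     # Keep trying new tree sizes until we find a good one
--     # Remember also indices of entries that make the outline of the tree
--     while treeSize != distinctLocations:
--
--         # If the expected size is larger than the number of distinct locations, this cannot be a Christmas tree shape
--         if treeSize > distinctLocations:
--             return False
--
--         # Grow the tree to the next possible size and try again
--         outline.append(treeSize)
--         treeSize = treeSize + treeGrower
--         outline.append(treeSize - 1)
--         treeGrower = treeGrower + 2
--
--     # If we survive the while loop without returning False, we have good amount of robot locations
--     # Next we need to check the shape of the tree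
--
--     # Check the location of the crown of the Christmas tree
--     crownX = sortedRobotLocations[0][0]
--     crownY = sortedRobotLocations[0][1]
--
--     # Go through the entries in the outline of the tree and check if they are in expected locations
--     adderX = -1
--     adderY = 1
--     isEven = True
--     for outlineSpot in outline:
--
--         # Check that the next outline location is in correct index
--         if sortedRobotLocations[outlineSpot] != (crownX + adderX, crownY + adderY):
--             return False
--
--         # If this is true, update the expected index location
--         if isEven:
--             adderX = adderX * -1
--             isEven = False
--         else:
--             adderX = (adderX + 1) * -1
--             adderY = adderY + 1
--             isEven = True
--
--     # If all the entries in the outline of the tree are good, we have a Christmas tree!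
--     return True
-- ===== SOURCE B (Python) =====
-- def checkChristmasTreeShape(robotLocations):
--     # A tree with n rows is exactly the point set {(cx+dx, cy+r) : 0 <= r < n, |dx| <= r}.
--     # Instead of sorting and checking indices, find the crown (minimal y, then minimal x
--     # on that row) and test every required point for membership in a hash set.
--     pts = set(robotLocations)
--     d = len(pts)
--     n = 0
--     while n * n < d:
--         n += 1
--     if n == 0 or n * n != d:
--         return False
--     cy = min(y for (x, y) in pts)
--     cx = min(x for (x, y) in pts if y == cy)
--     for r in range(n):
--         for dx in range(-r, r + 1):
--             if (cx + dx, cy + r) not in pts: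
--                 return False
--     return True
-- ===== Notes on version B (the rewrite author's own statement) =====
-- stated objective: alternative
-- what changed: B never sorts and never looks at indices: it observes that A's count-and-outline test on the sorted list holds exactly when the distinct points are the full triangle {(cx+dx, cy+r) : 0<=r<n, |dx|<=r}, so it finds the crown by min-y/min-x and checks membership of every required point in a hash set.
import Mathlib
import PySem

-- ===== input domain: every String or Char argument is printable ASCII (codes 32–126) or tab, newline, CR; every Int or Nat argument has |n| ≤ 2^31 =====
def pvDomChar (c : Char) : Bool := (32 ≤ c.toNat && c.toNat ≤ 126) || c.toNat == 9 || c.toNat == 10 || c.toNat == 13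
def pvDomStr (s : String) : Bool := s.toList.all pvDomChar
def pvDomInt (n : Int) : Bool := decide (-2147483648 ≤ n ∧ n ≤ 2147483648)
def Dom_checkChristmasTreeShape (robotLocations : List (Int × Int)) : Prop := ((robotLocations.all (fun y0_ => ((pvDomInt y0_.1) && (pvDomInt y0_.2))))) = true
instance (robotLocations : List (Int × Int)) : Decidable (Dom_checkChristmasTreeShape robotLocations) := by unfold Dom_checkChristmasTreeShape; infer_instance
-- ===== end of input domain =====

-- B drops the sort entirely: the distinct points pass A's test iff they are exactly
-- {(cx+dx, cy+r) : 0 ≤ r < n, |dx| ≤ r}, so B finds the crown by min-y/min-x and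
-- checks membership of every required point (objective: alternative algorithm).

-- ===== PORT A =====
-- A's while loop: grow treeSize by treeGrower, collecting outline indices;
-- fuel = distinct.toNat + 1 is always enough (treeSize grows by ≥ 3 per step);
-- fuel exhaustion (unreachable) returns none like the `treeSize > distinct` exit.
def pvOutlineLoop (distinct : Int) : Nat → Int → Int → List Int → Option (List Int)
  | 0, _, _, _ => none
  | fuel + 1, treeSize, treeGrower, outline =>
    if treeSize = distinct then some outline
    else if treeSize > distinct then none
    else pvOutlineLoop distinct fuel (treeSize + treeGrower) (treeGrower + 2)
          (outline ++ [treeSize, treeSize + treeGrower - 1])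

-- A's for loop over the outline with the adderX/adderY/isEven state.
-- pyGet? is always in range here (outline indices lie below the list length);
-- a none (Python IndexError, unreachable) is mapped to false.
def pvOutlineCheck (xs : List (Int × Int)) (crownX crownY : Int) :
    List Int → Int → Int → Bool → Bool
  | [], _, _, _ => true
  | spot :: rest, adderX, adderY, isEven =>
    if PySem.List.pyGet? xs spot ≠ some (crownX + adderX, crownY + adderY) then false
    else if isEven then
      pvOutlineCheck xs crownX crownY rest (adderX * (-1)) adderY false
    else
      pvOutlineCheck xs crownX crownY rest ((adderX + 1) * (-1)) (adderY + 1) true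

def checkChristmasTreeShape (robotLocations : List (Int × Int)) : Bool :=
  let sortedRobotLocations :=
    PySem.List.sorted2 (PySem.Set.ofList robotLocations) (fun p => p.2) (fun p => p.1)
  let distinctLocations : Int := sortedRobotLocations.length
  match pvOutlineLoop distinctLocations (distinctLocations.toNat + 1) 1 3 [] with
  | none => false
  | some outline =>
    match sortedRobotLocations with
    | [] => false  -- unreachable: the loop returns some only when distinctLocations ≥ 1
    | crown :: _ => pvOutlineCheck sortedRobotLocations crown.1 crown.2 outline (-1) 1 true

-- ===== PORT B =====
-- Source B's `while n*n < d: n += 1`; fuel = d.toNat + 1 is always enough.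
def pvFindN (d : Int) : Nat → Int → Int
  | 0, n => n
  | fuel + 1, n => if n * n < d then pvFindN d fuel (n + 1) else n

def checkChristmasTreeShape_alt (robotLocations : List (Int × Int)) : Bool :=
  let pts := PySem.Set.ofList robotLocations
  let d : Int := pts.length
  let n := pvFindN d (d.toNat + 1) 0
  if n = 0 ∨ n * n ≠ d then false
  else
    -- min of a generator over the set: an int minimum, independent of iteration order
    match PySem.List.min? (pts.map (fun p => p.2)) (fun v => v) with
    | none => false  -- unreachable: d ≠ 0, so pts is nonempty
    | some cy =>
      match PySem.List.min? ((pts.filter (fun p => p.2 == cy)).map (fun p => p.1)) (fun v => v) with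
      | none => false  -- unreachable: some point attains the minimal y
      | some cx =>
        (PySem.List.pyRange 0 n 1).all (fun r =>
          (PySem.List.pyRange (-r) (r + 1) 1).all (fun dx =>
            PySem.Set.contains pts (cx + dx, cy + r)))

-- ===== PRECONDITION & SPEC =====
def Spec_checkChristmasTreeShape (robotLocations : List (Int × Int)) (out : Bool) : Prop := out = checkChristmasTreeShape_alt robotLocations
instance (robotLocations : List (Int × Int)) (out : Bool) : Decidable (Spec_checkChristmasTreeShape robotLocations out) := by unfold Spec_checkChristmasTreeShape; infer_instance

-- ===== CLAIM (what is proved, stated in full; the proofs are below) =====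
def Claim_equal_checkChristmasTreeShape : Prop := ∀ (robotLocations : List (Int × Int)), Dom_checkChristmasTreeShape robotLocations → Spec_checkChristmasTreeShape robotLocations (checkChristmasTreeShape robotLocations)

-- ===== LEMMAS AND PROOFS =====

-- strict "sort by (y, x)" order on points; total on distinct points
def pvLlt (a b : Int × Int) : Prop := a.2 < b.2 ∨ (a.2 = b.2 ∧ a.1 < b.1)

-- the Bool comparator sorted2 uses for the keys ((·.2), (·.1))
def pvLltb (a b : Int × Int) : Bool :=
  decide (a.2 < b.2) || (!decide (b.2 < a.2) && decide (a.1 < b.1))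

lemma pvLltb_iff (a b : Int × Int) : pvLltb a b = true ↔ pvLlt a b := by
  unfold pvLltb pvLlt
  by_cases h1 : a.2 < b.2 <;> by_cases h2 : b.2 < a.2 <;> by_cases h3 : a.1 < b.1 <;>
    simp [h1, h2, h3] <;> omega

lemma pvLlt_trans {a b c : Int × Int} (h1 : pvLlt a b) (h2 : pvLlt b c) : pvLlt a c := by
  unfold pvLlt at *; omega

lemma pvLlt_ne {a b : Int × Int} (h : pvLlt a b) : a ≠ b := by
  intro he; subst he; unfold pvLlt at h; omega

lemma pvLlt_total {a b : Int × Int} (h : a ≠ b) : pvLlt a b ∨ pvLlt b a := by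
  unfold pvLlt
  by_cases h2 : a.2 = b.2
  · have h1 : a.1 ≠ b.1 := fun hc => h (Prod.ext_iff.mpr ⟨hc, h2⟩)
    omega
  · omega

lemma pvInsertBy_pairwise (x : Int × Int) (acc : List (Int × Int)) (hx : x ∉ acc)
    (h : acc.Pairwise pvLlt) : (PySem.List.insertBy pvLltb x acc).Pairwise pvLlt := by
  induction acc with
  | nil => simp [PySem.List.insertBy]
  | cons y ys ih =>
    rw [List.pairwise_cons] at h
    obtain ⟨hy, hys⟩ := h
    have hxy : x ≠ y := fun he => hx (by simp [he])
    have hxys : x ∉ ys := fun hc => hx (List.mem_cons_of_mem _ hc)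
    by_cases hb : pvLltb x y = true
    · rw [show PySem.List.insertBy pvLltb x (y :: ys) = x :: y :: ys by
        simp [PySem.List.insertBy, hb]]
      have hxy' : pvLlt x y := (pvLltb_iff x y).mp hb
      refine List.pairwise_cons.mpr ⟨?_, List.pairwise_cons.mpr ⟨hy, hys⟩⟩
      intro z hz
      rcases List.mem_cons.mp hz with he | hz'
      · exact he ▸ hxy'
      · exact pvLlt_trans hxy' (hy z hz')
    · rw [show PySem.List.insertBy pvLltb x (y :: ys) = y :: PySem.List.insertBy pvLltb x ys by
        simp [PySem.List.insertBy, hb]]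
      refine List.pairwise_cons.mpr ⟨?_, ih hxys hys⟩
      intro z hz
      rcases (PySem.List.mem_insertBy _ _ _ _).mp hz with he | hz'
      · rw [he]
        rcases pvLlt_total hxy with h1 | h2
        · exact absurd ((pvLltb_iff x y).mpr h1) (by simpa using hb)
        · exact h2
      · exact hy z hz'

lemma pvFoldl_insertBy_pairwise : ∀ (xs acc : List (Int × Int)), acc.Pairwise pvLlt →
    (∀ y ∈ xs, y ∉ acc) → xs.Nodup →
    (xs.foldl (fun acc x => PySem.List.insertBy pvLltb x acc) acc).Pairwise pvLlt := by
  intro xs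
  induction xs with
  | nil => intro acc h _ _; simpa using h
  | cons x xs ih =>
    intro acc h hnin hnd
    simp only [List.foldl_cons]
    apply ih
    · exact pvInsertBy_pairwise x acc (hnin x (by simp)) h
    · intro y hy hmem
      rcases (PySem.List.mem_insertBy _ _ _ _).mp hmem with he | hmem'
      · subst he; exact (List.nodup_cons.mp hnd).1 hy
      · exact hnin y (by simp [hy]) hmem'
    · exact (List.nodup_cons.mp hnd).2

lemma pvSorted2_pairwise (xs : List (Int × Int)) (h : xs.Nodup) :
    (PySem.List.sorted2 xs (fun p => p.2) (fun p => p.1)).Pairwise pvLlt := by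
  have he : PySem.List.sorted2 xs (fun p => p.2) (fun p => p.1) =
      xs.foldl (fun acc x => PySem.List.insertBy pvLltb x acc) [] := rfl
  rw [he]
  exact pvFoldl_insertBy_pairwise xs [] (by simp) (by simp) h

-- the canonical tree: row r is the 2r+1 points at height cy+r
def pvTreeRow (cx cy : Int) (r : Nat) : List (Int × Int) :=
  (List.range (2 * r + 1)).map (fun j : Nat => (cx - (r : Int) + (j : Int), cy + (r : Int)))

lemma pvTreeRow_length (cx cy : Int) (r : Nat) : (pvTreeRow cx cy r).length = 2 * r + 1 := by
  rw [pvTreeRow, List.length_map, List.length_range]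

def pvTree (cx cy : Int) (n : Nat) : List (Int × Int) :=
  (List.range n).flatMap (pvTreeRow cx cy)

lemma pvTree_succ (cx cy : Int) (n : Nat) :
    pvTree cx cy (n + 1) = pvTree cx cy n ++ pvTreeRow cx cy n := by
  simp [pvTree, List.range_succ]

lemma pvTree_length (cx cy : Int) (n : Nat) : (pvTree cx cy n).length = n * n := by
  induction n with
  | zero => simp [pvTree]
  | succ m ih =>
    rw [pvTree_succ, List.length_append, ih, pvTreeRow_length]
    ring

lemma pvTree_getD (cx cy : Int) : ∀ (n r i : Nat), r < n → r * r ≤ i → i ≤ r * r + 2 * r →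
    (pvTree cx cy n).getD i (0, 0) = (cx - r + ((i - r * r : Nat) : Int), cy + r) := by
  intro n
  induction n with
  | zero => intro r i hr; exact absurd hr (Nat.not_lt_zero r)
  | succ m ih =>
    intro r i hr hi1 hi2
    rw [pvTree_succ]
    by_cases hrm : r < m
    · have hr1 : r + 1 ≤ m := hrm
      have := Nat.mul_le_mul hr1 hr1
      have hexp : (r + 1) * (r + 1) = r * r + 2 * r + 1 := by ring
      have hi : i < m * m := by omega
      rw [List.getD_append _ _ _ _ (by rw [pvTree_length]; omega)]
      exact ih r i hrm hi1 hi2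
    · have hrm' : r = m := by omega
      subst hrm'
      have hlen : (pvTree cx cy r).length = r * r := pvTree_length cx cy r
      have hj : i - r * r < 2 * r + 1 := by omega
      rw [List.getD_append_right _ _ _ _ (by rw [hlen]; omega), hlen]
      simp [pvTreeRow, List.getD_eq_getElem?_getD, hj]

lemma pvSqrt_bounds (i : Nat) :
    Nat.sqrt i * Nat.sqrt i ≤ i ∧ i < Nat.sqrt i * Nat.sqrt i + 2 * Nat.sqrt i + 1 := by
  have h1 := Nat.sqrt_le' i
  have h2 := Nat.lt_succ_sqrt' i
  rw [pow_two] at h1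
  rw [Nat.succ_eq_add_one, pow_two] at h2
  have h3 : (Nat.sqrt i + 1) * (Nat.sqrt i + 1) = Nat.sqrt i * Nat.sqrt i + 2 * Nat.sqrt i + 1 := by
    ring
  omega

lemma pvTree_pairwise (cx cy : Int) (n : Nat) : (pvTree cx cy n).Pairwise pvLlt := by
  rw [List.pairwise_iff_getElem]
  intro i j hi hj hij
  rw [pvTree_length] at hi hj
  have hbi := pvSqrt_bounds i
  have hbj := pvSqrt_bounds j
  have hri : Nat.sqrt i < n := by
    by_contra hc
    have hsr : n ≤ Nat.sqrt i := Nat.le_of_not_lt hc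
    have := Nat.mul_le_mul hsr hsr
    omega
  have hrj : Nat.sqrt j < n := by
    by_contra hc
    have hsr : n ≤ Nat.sqrt j := Nat.le_of_not_lt hc
    have := Nat.mul_le_mul hsr hsr
    omega
  have gi := pvTree_getD cx cy n (Nat.sqrt i) i hri hbi.1 (by omega)
  have gj := pvTree_getD cx cy n (Nat.sqrt j) j hrj hbj.1 (by omega)
  rw [List.getD_eq_getElem _ _ (by rw [pvTree_length]; omega)] at gi
  rw [List.getD_eq_getElem _ _ (by rw [pvTree_length]; omega)] at gj
  rw [gi, gj]
  have hmono : Nat.sqrt i ≤ Nat.sqrt j := Nat.sqrt_le_sqrt (le_of_lt hij)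
  unfold pvLlt
  dsimp only
  rcases Nat.eq_or_lt_of_le hmono with he | hlt
  · right
    rw [he]
    refine ⟨rfl, ?_⟩
    have h1 : Nat.sqrt j * Nat.sqrt j ≤ i := by rw [← he]; exact hbi.1
    omega
  · left
    omega

lemma pvTree_nodup (cx cy : Int) (n : Nat) : (pvTree cx cy n).Nodup :=
  (pvTree_pairwise cx cy n).imp (fun h => pvLlt_ne h)

lemma pvTree_mem (cx cy : Int) (n : Nat) (q : Int × Int) :
    q ∈ pvTree cx cy n ↔ ∃ r < n, ∃ j < 2 * r + 1, q = (cx - (r : Int) + (j : Int), cy + (r : Int)) := by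
  constructor
  · intro hq
    rw [pvTree, List.mem_flatMap] at hq
    obtain ⟨r, hr, hq⟩ := hq
    rw [pvTreeRow, List.mem_map] at hq
    obtain ⟨j, hj, rfl⟩ := hq
    exact ⟨r, List.mem_range.mp hr, j, List.mem_range.mp hj, rfl⟩
  · rintro ⟨r, hr, j, hj, rfl⟩
    rw [pvTree, List.mem_flatMap]
    refine ⟨r, List.mem_range.mpr hr, ?_⟩
    rw [pvTreeRow, List.mem_map]
    exact ⟨j, List.mem_range.mpr hj, rfl⟩

-- THE KEY LEMMA: a strictly (y,x)-sorted list of s*s points whose row-end entries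
-- match is forced to be the canonical tree row by row (between the two ends of
-- row r there are exactly 2r-1 lattice slots in the (y,x) order).
lemma pvRows_eq (S : List (Int × Int)) (cx cy : Int) (s : Nat)
    (hp : S.Pairwise pvLlt) (hlen : S.length = s * s)
    (h0 : S.getD 0 (0, 0) = (cx, cy))
    (hr : ∀ r : Nat, 1 ≤ r → r < s →
      S.getD (r * r) (0, 0) = (cx - r, cy + r) ∧
      S.getD (r * r + 2 * r) (0, 0) = (cx + r, cy + r)) :
    ∀ r : Nat, r < s → ∀ k : Nat, k ≤ 2 * r →
      S.getD (r * r + k) (0, 0) = (cx - r + (k : Int), cy + r) := by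
  have hg : ∀ i j : Nat, i < j → j < s * s → pvLlt (S.getD i (0, 0)) (S.getD j (0, 0)) := by
    intro i j hij hj
    have hj' : j < S.length := by omega
    have hi' : i < S.length := by omega
    rw [List.getD_eq_getElem S _ hi', List.getD_eq_getElem S _ hj']
    exact List.pairwise_iff_getElem.mp hp i j hi' hj' hij
  intro r hrs k hk
  rcases Nat.eq_zero_or_pos r with hr0 | hr1
  · subst hr0
    have hk0 : k = 0 := by omega
    subst hk0
    simpa using h0
  · obtain ⟨hL, hR⟩ := hr r hr1 hrs
    have hs1 : r + 1 ≤ s := hrs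
    have hmul := Nat.mul_le_mul hs1 hs1
    have hexp : (r + 1) * (r + 1) = r * r + 2 * r + 1 := by ring
    have hrn : r * r + 2 * r < s * s := by omega
    have hy : ∀ k : Nat, k ≤ 2 * r → (S.getD (r * r + k) (0, 0)).2 = cy + r := by
      intro k hk
      rcases Nat.eq_zero_or_pos k with h0' | hpos
      · subst h0'; rw [Nat.add_zero, hL]
      · rcases Nat.eq_or_lt_of_le hk with he | hltk
        · rw [he, hR]
        · have l1 := hg (r * r) (r * r + k) (by omega) (by omega)
          have l2 := hg (r * r + k) (r * r + 2 * r) (by omega) (by omega)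
          rw [hL] at l1
          rw [hR] at l2
          have l1' : cy + (r : Int) < (S.getD (r * r + k) (0, 0)).2 ∨
              (cy + (r : Int) = (S.getD (r * r + k) (0, 0)).2 ∧
                cx - (r : Int) < (S.getD (r * r + k) (0, 0)).1) := l1
          have l2' : (S.getD (r * r + k) (0, 0)).2 < cy + (r : Int) ∨
              ((S.getD (r * r + k) (0, 0)).2 = cy + (r : Int) ∧
                (S.getD (r * r + k) (0, 0)).1 < cx + (r : Int)) := l2
          omega
    have hadj : ∀ k : Nat, k < 2 * r →
        (S.getD (r * r + k) (0, 0)).1 < (S.getD (r * r + k + 1) (0, 0)).1 := by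
      intro k hkk
      have l := hg (r * r + k) (r * r + k + 1) (by omega) (by omega)
      have y1 := hy k (by omega)
      have y2 := hy (k + 1) (by omega)
      rw [show r * r + (k + 1) = r * r + k + 1 by omega] at y2
      simp only [pvLlt] at l
      omega
    have hlow : ∀ k : Nat, k ≤ 2 * r →
        cx - r + (k : Int) ≤ (S.getD (r * r + k) (0, 0)).1 := by
      intro k
      induction k with
      | zero =>
        intro _
        rw [show r * r + 0 = r * r from rfl, hL]
        dsimp only
        simp
      | succ k ihk =>
        intro hk'
        have h1 := ihk (by omega)
        have h2 := hadj k (by omega)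
        rw [show r * r + (k + 1) = r * r + k + 1 by omega]
        push_cast
        push_cast at h1
        omega
    have hhigh : ∀ m : Nat, m ≤ 2 * r →
        (S.getD (r * r + (2 * r - m)) (0, 0)).1 ≤ cx + r - (m : Int) := by
      intro m
      induction m with
      | zero =>
        intro _
        rw [show r * r + (2 * r - 0) = r * r + 2 * r by omega, hR]
        dsimp only
        simp
      | succ m ihm =>
        intro hm
        have h1 := ihm (by omega)
        have h2 := hadj (2 * r - (m + 1)) (by omega)
        rw [show r * r + (2 * r - (m + 1)) + 1 = r * r + (2 * r - m) by omega] at h2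
        push_cast
        push_cast at h1
        omega
    have hh := hhigh (2 * r - k) (by omega)
    rw [show r * r + (2 * r - (2 * r - k)) = r * r + k by omega] at hh
    have hl := hlow k hk
    have hyk := hy k hk
    have hcast : ((2 * r - k : Nat) : Int) = 2 * (r : Int) - (k : Int) := by omega
    rw [hcast] at hh
    apply Prod.ext_iff.mpr
    constructor
    · dsimp only; omega
    · dsimp only; exact hyk

lemma pvS_eq_tree (S : List (Int × Int)) (cx cy : Int) (s : Nat)
    (hp : S.Pairwise pvLlt) (hlen : S.length = s * s)
    (h0 : S.getD 0 (0, 0) = (cx, cy))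
    (hr : ∀ r : Nat, 1 ≤ r → r < s →
      S.getD (r * r) (0, 0) = (cx - r, cy + r) ∧
      S.getD (r * r + 2 * r) (0, 0) = (cx + r, cy + r)) :
    S = pvTree cx cy s := by
  apply List.ext_getElem (by rw [hlen, pvTree_length])
  intro i hi hi'
  have hi2 : i < s * s := by omega
  have hb := pvSqrt_bounds i
  have hrs : Nat.sqrt i < s := by
    by_contra hc
    have hsr : s ≤ Nat.sqrt i := Nat.le_of_not_lt hc
    have := Nat.mul_le_mul hsr hsr
    omega
  have hk : i - Nat.sqrt i * Nat.sqrt i ≤ 2 * Nat.sqrt i := by omega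
  have h1 := pvRows_eq S cx cy s hp hlen h0 hr (Nat.sqrt i) hrs (i - Nat.sqrt i * Nat.sqrt i) hk
  have h2 := pvTree_getD cx cy s (Nat.sqrt i) i hrs hb.1 (by omega)
  rw [show Nat.sqrt i * Nat.sqrt i + (i - Nat.sqrt i * Nat.sqrt i) = i by omega] at h1
  rw [List.getD_eq_getElem S _ hi] at h1
  rw [List.getD_eq_getElem _ _ hi'] at h2
  rw [h1, h2]

-- ===== characterization of A's loops =====

-- the outline index list A builds for a tree of s rows, rows k..s-1
def pvPairs : Nat → Nat → List Int
  | _, 0 => []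
  | k, m + 1 => ((k * k : Nat) : Int) :: ((k * k + 2 * k : Nat) : Int) :: pvPairs (k + 1) m

lemma pvOutlineLoop_eq (dn : Nat) : ∀ (fuel k : Nat) (acc : List Int),
    1 ≤ k → Nat.sqrt dn + 2 ≤ fuel + k →
    pvOutlineLoop (dn : Int) fuel ((k * k : Nat) : Int) ((2 * k + 1 : Nat) : Int) acc
      = if k ≤ Nat.sqrt dn ∧ Nat.sqrt dn * Nat.sqrt dn = dn
        then some (acc ++ pvPairs k (Nat.sqrt dn - k)) else none := by
  intro fuel
  induction fuel with
  | zero =>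
    intro k acc hk hf
    have : ¬ k ≤ Nat.sqrt dn := by omega
    simp [pvOutlineLoop, this]
  | succ f ih =>
    intro k acc hk hf
    simp only [pvOutlineLoop]
    by_cases h1 : ((k * k : Nat) : Int) = (dn : Int)
    · have hkk : k * k = dn := by exact_mod_cast h1
      have hs : Nat.sqrt dn = k := by
        rw [← hkk, show k * k = k ^ 2 by ring]; exact Nat.sqrt_eq' k
      rw [if_pos h1]
      simp [hs, hkk, pvPairs]
    · rw [if_neg h1]
      have hkk : k * k ≠ dn := fun hc => h1 (by exact_mod_cast hc)
      by_cases h2 : ((k * k : Nat) : Int) > (dn : Int)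
      · have hgt : dn < k * k := by exact_mod_cast h2
        have : ¬ k ≤ Nat.sqrt dn := fun hc => by
          have := Nat.le_sqrt.mp hc; omega
        rw [if_pos h2]
        simp [this]
      · have hlt : k * k < dn := by
          have : (dn : Int) ≥ ((k * k : Nat) : Int) := le_of_not_gt h2
          have h3 : k * k ≤ dn := by exact_mod_cast this
          omega
        have hks : k ≤ Nat.sqrt dn := Nat.le_sqrt.mpr (le_of_lt hlt)
        rw [if_neg h2]
        have harg1 : ((k * k : Nat) : Int) + ((2 * k + 1 : Nat) : Int)
            = (((k + 1) * (k + 1) : Nat) : Int) := by push_cast; ring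
        have harg2 : ((2 * k + 1 : Nat) : Int) + 2 = ((2 * (k + 1) + 1 : Nat) : Int) := by
          push_cast; ring
        have harg3 : ((k * k : Nat) : Int) + ((2 * k + 1 : Nat) : Int) - 1
            = ((k * k + 2 * k : Nat) : Int) := by push_cast; ring
        rw [harg3, harg1, harg2]
        have ihres := ih (k + 1) (acc ++ [((k * k : Nat) : Int),
          ((k * k + 2 * k : Nat) : Int)]) (by omega) (by omega)
        rw [ihres]
        by_cases hsq : Nat.sqrt dn * Nat.sqrt dn = dn
        · have hne : k ≠ Nat.sqrt dn := by
            intro hc; rw [hc] at hkk; exact hkk hsq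
          have hk1 : k + 1 ≤ Nat.sqrt dn := by omega
          have hm : Nat.sqrt dn - k = (Nat.sqrt dn - (k + 1)) + 1 := by omega
          rw [if_pos ⟨hk1, hsq⟩, if_pos ⟨hks, hsq⟩, hm]
          simp [pvPairs]
        · rw [if_neg (by tauto), if_neg (by tauto)]

-- A's stateful outline walk is exactly the row-end conditions
lemma pvCheck_iff (xs : List (Int × Int)) (cx cy : Int) : ∀ (m k : Nat), 1 ≤ k →
    (pvOutlineCheck xs cx cy (pvPairs k m) (-(k : Int)) (k : Int) true = true ↔
      ∀ r : Nat, k ≤ r → r < k + m →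
        PySem.List.pyGet? xs ((r * r : Nat) : Int) = some (cx - r, cy + r) ∧
        PySem.List.pyGet? xs ((r * r + 2 * r : Nat) : Int) = some (cx + r, cy + r)) := by
  intro m
  induction m with
  | zero =>
    intro k hk
    refine ⟨fun _ r h1 h2 => absurd h2 (by omega), fun _ => by simp [pvPairs, pvOutlineCheck]⟩
  | succ m ih =>
    intro k hk
    rw [pvPairs]
    simp only [pvOutlineCheck, ne_eq, ite_not]
    rw [show cx + -(k : Int) = cx - k by ring]
    rw [show (-(k : Int)) * (-1) = (k : Int) by ring]
    rw [show ((k : Int) + 1) * (-1) = -((k + 1 : Nat) : Int) by push_cast; ring]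
    rw [show (k : Int) + 1 = ((k + 1 : Nat) : Int) by push_cast; ring]
    constructor
    · intro h r hr1 hr2
      by_cases h1 : PySem.List.pyGet? xs ((k * k : Nat) : Int) = some (cx - k, cy + k)
      · rw [if_pos h1] at h
        by_cases h2 : PySem.List.pyGet? xs ((k * k + 2 * k : Nat) : Int) = some (cx + k, cy + k)
        · rw [if_pos h2] at h
          rcases Nat.eq_or_lt_of_le hr1 with he | hlt
          · subst he; exact ⟨h1, h2⟩
          · exact (ih (k + 1) (by omega)).mp h r hlt (by omega)
        · rw [if_neg h2] at h; exact absurd h (by simp)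
      · rw [if_neg h1] at h; exact absurd h (by simp)
    · intro h
      have hk0 := h k (le_refl k) (by omega)
      rw [if_pos hk0.1, if_pos hk0.2]
      exact (ih (k + 1) (by omega)).mpr (fun r h1 h2 => h r (by omega) (by omega))

-- pyGet? at an in-range natural index, against getD
lemma pvGet_conv (xs : List (Int × Int)) (i : Nat) (hi : i < xs.length) (v : Int × Int) :
    PySem.List.pyGet? xs ((i : Nat) : Int) = some v ↔ xs.getD i (0, 0) = v := by
  rw [PySem.List.pyGet?_natCast, List.getElem?_eq_getElem hi, List.getD_eq_getElem xs _ hi]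
  simp

-- ===== characterization of B's counting loop =====

def pvCsq (dn : Nat) : Nat :=
  if Nat.sqrt dn * Nat.sqrt dn = dn then Nat.sqrt dn else Nat.sqrt dn + 1

lemma pvCsq_ge (dn : Nat) : dn ≤ pvCsq dn * pvCsq dn := by
  unfold pvCsq
  have h1 := (pvSqrt_bounds dn).1
  have h2 := (pvSqrt_bounds dn).2
  have h3 : (Nat.sqrt dn + 1) * (Nat.sqrt dn + 1)
      = Nat.sqrt dn * Nat.sqrt dn + 2 * Nat.sqrt dn + 1 := by ring
  split_ifs with h <;> omega

lemma pvCsq_min (dn m : Nat) (h : dn ≤ m * m) : pvCsq dn ≤ m := by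
  have h1 := (pvSqrt_bounds dn).1
  have hm : Nat.sqrt dn ≤ m := by
    by_contra hc
    have h3 : m + 1 ≤ Nat.sqrt dn := by omega
    have := Nat.mul_le_mul h3 h3
    have hexp : (m + 1) * (m + 1) = m * m + 2 * m + 1 := by ring
    omega
  unfold pvCsq
  split_ifs with hsq
  · exact hm
  · rcases Nat.lt_or_ge (Nat.sqrt dn) m with hlt | hge
    · omega
    · have he : Nat.sqrt dn = m := by omega
      rw [he] at h1
      exfalso; apply hsq; rw [he]; omega

lemma pvFindN_eq (dn : Nat) : ∀ (fuel k : Nat), k ≤ pvCsq dn → pvCsq dn ≤ k + fuel →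
    pvFindN (dn : Int) fuel (k : Int) = (pvCsq dn : Int) := by
  intro fuel
  induction fuel with
  | zero =>
    intro k h1 h2
    have : k = pvCsq dn := by omega
    simp [pvFindN, this]
  | succ f ih =>
    intro k h1 h2
    simp only [pvFindN]
    by_cases hc : (k : Int) * (k : Int) < (dn : Int)
    · rw [if_pos hc]
      have hkk : k * k < dn := by exact_mod_cast hc
      have hklt : k < pvCsq dn := by
        by_contra hcn
        have h3 : pvCsq dn ≤ k := by omega
        have := Nat.mul_le_mul h3 h3
        have hge := pvCsq_ge dn
        omega
      rw [show (k : Int) + 1 = ((k + 1 : Nat) : Int) by push_cast; ring]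
      exact ih (k + 1) (by omega) (by omega)
    · rw [if_neg hc]
      have hkk : dn ≤ k * k := by
        have : ¬ (k * k < dn) := fun hlt => hc (by exact_mod_cast hlt)
        omega
      have := pvCsq_min dn k hkk
      have he : k = pvCsq dn := by omega
      exact_mod_cast congrArg (fun x : Nat => (x : Int)) he

-- ===== range bridges for B's for loops =====

lemma pvRange_shift : ∀ (m : Nat) (a : Int),
    PySem.List.pyRange a (a + (m : Nat)) 1 = (List.range m).map (fun j : Nat => a + (j : Int)) := by
  intro m
  induction m with
  | zero => intro a; simp [PySem.List.pyRange_one_eq_nil]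
  | succ m ih =>
    intro a
    have hlt : a < a + ((m + 1 : Nat) : Int) := by push_cast; omega
    rw [PySem.List.pyRange_one_cons hlt]
    rw [show a + ((m + 1 : Nat) : Int) = (a + 1) + ((m : Nat) : Int) by push_cast; ring]
    rw [ih (a + 1), List.range_succ_eq_map, List.map_cons, List.map_map]
    congr 1
    · simp
    · refine List.map_congr_left (fun j _ => ?_)
      simp only [Function.comp_apply, Nat.succ_eq_add_one]
      push_cast
      ring

lemma pvRange_row (r : Nat) :
    PySem.List.pyRange (-(r : Int)) ((r : Int) + 1) 1
      = (List.range (2 * r + 1)).map (fun j : Nat => -(r : Int) + (j : Int)) := by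
  rw [show (r : Int) + 1 = -(r : Int) + ((2 * r + 1 : Nat) : Int) by push_cast; ring]
  exact pvRange_shift (2 * r + 1) (-(r : Int))

-- ===== the equivalence, for an arbitrary duplicate-free point list P =====

lemma pvCore (P : List (Int × Int)) (hnod : P.Nodup) :
    (match pvOutlineLoop ((PySem.List.sorted2 P (fun p => p.2) (fun p => p.1)).length : Int)
        (((PySem.List.sorted2 P (fun p => p.2) (fun p => p.1)).length : Int).toNat + 1) 1 3 [] with
      | none => false
      | some outline =>
        match PySem.List.sorted2 P (fun p => p.2) (fun p => p.1) with
        | [] => false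
        | crown :: _ =>
          pvOutlineCheck (PySem.List.sorted2 P (fun p => p.2) (fun p => p.1))
            crown.1 crown.2 outline (-1) 1 true)
    =
    (if pvFindN (P.length : Int) ((P.length : Int).toNat + 1) 0 = 0 ∨
        pvFindN (P.length : Int) ((P.length : Int).toNat + 1) 0 *
          pvFindN (P.length : Int) ((P.length : Int).toNat + 1) 0 ≠ (P.length : Int)
      then false
      else
        match PySem.List.min? (P.map (fun p => p.2)) (fun v => v) with
        | none => false
        | some cy =>
          match PySem.List.min? ((P.filter (fun p => p.2 == cy)).map (fun p => p.1)) (fun v => v) with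
          | none => false
          | some cx =>
            (PySem.List.pyRange 0 (pvFindN (P.length : Int) ((P.length : Int).toNat + 1) 0) 1).all
              (fun r => (PySem.List.pyRange (-r) (r + 1) 1).all
                (fun dx => PySem.Set.contains P (cx + dx, cy + r)))) := by
  set S := PySem.List.sorted2 P (fun p => p.2) (fun p => p.1) with hSdef
  have hperm : S.Perm P := PySem.List.sorted2_perm P _ _ _
  have hSlen : S.length = P.length := hperm.length_eq
  have hpair : S.Pairwise pvLlt := pvSorted2_pairwise P hnod
  set dn := P.length with hdn
  rw [hSlen]
  rw [Int.toNat_natCast]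
  set s := Nat.sqrt dn with hs
  have hout : pvOutlineLoop (dn : Int) (dn + 1) 1 3 []
      = if 1 ≤ s ∧ s * s = dn then some (pvPairs 1 (s - 1)) else none := by
    have := pvOutlineLoop_eq dn (dn + 1) 1 [] (le_refl 1)
      (by have := Nat.sqrt_le_self dn; omega)
    simpa using this
  have hfind : pvFindN (dn : Int) (dn + 1) 0 = (pvCsq dn : Int) := by
    have hcs : pvCsq dn ≤ dn + 1 := by
      have h1 : Nat.sqrt dn ≤ dn := Nat.sqrt_le_self dn
      unfold pvCsq; split_ifs <;> omega
    have := pvFindN_eq dn (dn + 1) 0 (by omega) (by omega)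
    simpa using this
  rw [hout, hfind]
  by_cases hcond : 1 ≤ s ∧ s * s = dn
  · -- a positive perfect square: both sides do the real shape check
    rw [if_pos hcond]
    have hcsq : pvCsq dn = s := by unfold pvCsq; rw [if_pos hcond.2]
    rw [hcsq]
    have hBfalse : ¬ ((s : Int) = 0 ∨ (s : Int) * (s : Int) ≠ (dn : Int)) := by
      rintro (h0 | hne)
      · have : s = 0 := by exact_mod_cast h0
        omega
      · exact hne (by exact_mod_cast hcond.2)
    rw [if_neg hBfalse]
    have hdpos : 1 ≤ dn := by
      have h1 := Nat.mul_le_mul hcond.1 hcond.1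
      omega
    -- S is nonempty
    have hSlen' : S.length = s * s := by omega
    have hSne : S ≠ [] := by
      intro hc; rw [hc] at hSlen; simp at hSlen; omega
    -- the two mins are defined
    have hPne : P ≠ [] := by
      intro hc; rw [hc] at hdn; simp at hdn; omega
    rcases hmin1 : PySem.List.min? (P.map (fun p => p.2)) (fun v => v) with _ | cy0
    · exfalso
      have := (PySem.List.min?_eq_none_iff _ _).mp hmin1
      simp at this
      exact hPne this
    have hcy0mem : cy0 ∈ P.map (fun p => p.2) := PySem.List.min?_mem hmin1
    obtain ⟨p0, hp0P, hp0y⟩ := List.mem_map.mp hcy0mem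
    rcases hmin2 : PySem.List.min? ((P.filter (fun p => p.2 == cy0)).map (fun p => p.1))
        (fun v => v) with _ | cx0
    · exfalso
      have := (PySem.List.min?_eq_none_iff _ _).mp hmin2
      simp only [List.map_eq_nil_iff] at this
      have : p0 ∈ (List.nil : List (Int × Int)) := by
        rw [← this]
        exact List.mem_filter.mpr ⟨hp0P, by simp [hp0y]⟩
      simp at this
    -- now both sides are loop values; turn each into a proposition
    rw [hmin1]
    clear_value S
    rcases S with _ | ⟨crown, rest⟩
    · exact absurd rfl hSne
    dsimp only
    rw [hmin2]
    dsimp only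
    -- A's walk as row-end getD conditions
    have hcheck := pvCheck_iff (crown :: rest) crown.1 crown.2 (s - 1) 1 (le_refl 1)
    simp only [Nat.cast_one] at hcheck
    rw [show 1 + (s - 1) = s by omega] at hcheck
    -- B's nested all as a membership statement
    have hloop : ((PySem.List.pyRange 0 ((s : Nat) : Int) 1).all
          (fun r => (PySem.List.pyRange (-r) (r + 1) 1).all
            (fun dx => PySem.Set.contains P (cx0 + dx, cy0 + r))) = true)
        ↔ ∀ r : Nat, r < s → ∀ j : Nat, j < 2 * r + 1 →
            (cx0 - r + (j : Int), cy0 + r) ∈ P := by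
      rw [PySem.List.pyRange_zero_natCast s]
      rw [List.all_eq_true]
      constructor
      · intro h r hr j hj
        have hm : ((r : Nat) : Int) ∈ (List.range s).map (fun k : Nat => (k : Int)) :=
          List.mem_map.mpr ⟨r, List.mem_range.mpr hr, rfl⟩
        have h2 := h _ hm
        rw [pvRange_row r, List.all_eq_true] at h2
        have hm2 : (-(r : Int) + (j : Int)) ∈
            (List.range (2 * r + 1)).map (fun j : Nat => -(r : Int) + (j : Int)) :=
          List.mem_map.mpr ⟨j, List.mem_range.mpr hj, rfl⟩
        have h3 := h2 _ hm2
        rw [PySem.Set.contains_iff] at h3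
        rw [show cx0 + (-(r : Int) + (j : Int)) = cx0 - r + (j : Int) by ring] at h3
        exact h3
      · intro h x hx
        obtain ⟨r, hr, rfl⟩ := List.mem_map.mp hx
        rw [pvRange_row r, List.all_eq_true]
        intro dx hdx
        obtain ⟨j, hj, rfl⟩ := List.mem_map.mp hdx
        rw [PySem.Set.contains_iff]
        rw [show cx0 + (-(r : Int) + (j : Int)) = cx0 - r + (j : Int) by ring]
        exact h r (List.mem_range.mp hr) j (List.mem_range.mp hj)
    -- index bound for the row ends
    have hidx : ∀ r : Nat, 1 ≤ r → r < s → r * r + 2 * r < (crown :: rest).length := by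
      intro r _ hrlt
      have h1 : r + 1 ≤ s := hrlt
      have := Nat.mul_le_mul h1 h1
      have hexp : (r + 1) * (r + 1) = r * r + 2 * r + 1 := by ring
      omega
    rw [Bool.eq_iff_iff]
    rw [hcheck, hloop]
    have h0 : (crown :: rest).getD 0 (0, 0) = (crown.1, crown.2) := by simp
    constructor
    · -- A's conditions force S = pvTree crown; then B's mins find the crown and
      -- every required point is a member
      intro hA
      have hr' : ∀ r : Nat, 1 ≤ r → r < s →
          (crown :: rest).getD (r * r) (0, 0) = (crown.1 - r, crown.2 + r) ∧
          (crown :: rest).getD (r * r + 2 * r) (0, 0) = (crown.1 + r, crown.2 + r) := by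
        intro r h1 h2
        obtain ⟨hA1, hA2⟩ := hA r h1 h2
        exact ⟨(pvGet_conv _ _ (by have := hidx r h1 h2; omega) _).mp hA1,
               (pvGet_conv _ _ (hidx r h1 h2) _).mp hA2⟩
      have hSeq : (crown :: rest) = pvTree crown.1 crown.2 s :=
        pvS_eq_tree _ crown.1 crown.2 s hpair hSlen' h0 hr'
      have hmemP : ∀ q, q ∈ pvTree crown.1 crown.2 s → q ∈ P := by
        intro q hq
        exact hperm.subset (hSeq ▸ hq)
      have hcrownP : crown ∈ P := hperm.subset (List.mem_cons_self ..)
      -- every tree point has y ≥ crown.2, and the only one at y = crown.2 is crown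
      have htreey : ∀ q, q ∈ pvTree crown.1 crown.2 s → crown.2 ≤ q.2 ∧
          (q.2 = crown.2 → q = (crown.1, crown.2)) := by
        intro q hq
        rw [pvTree_mem] at hq
        obtain ⟨r, hrlt, j, hjlt, rfl⟩ := hq
        constructor
        · show crown.2 ≤ crown.2 + (r : Int)
          omega
        · intro hy2
          have h' : crown.2 + (r : Int) = crown.2 := hy2
          have hr0 : r = 0 := by omega
          subst hr0
          have hj0 : j = 0 := by omega
          subst hj0
          simp
      -- cy0 is crown.2
      have hcy : cy0 = crown.2 := by
        have hle : cy0 ≤ crown.2 := by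
          have := PySem.List.min?_isMin hmin1 crown.2 (List.mem_map.mpr ⟨crown, hcrownP, rfl⟩)
          simpa using this
        have hge : crown.2 ≤ cy0 := by
          have hp0S : p0 ∈ pvTree crown.1 crown.2 s := by
            rw [← hSeq]
            exact (hperm.mem_iff).mpr hp0P
          have := (htreey p0 hp0S).1
          omega
        omega
      -- cx0 is crown.1
      have hcx : cx0 = crown.1 := by
        have hcx0mem := PySem.List.min?_mem hmin2
        obtain ⟨q, hqf, hqx⟩ := List.mem_map.mp hcx0mem
        obtain ⟨hqP, hqy⟩ := List.mem_filter.mp hqf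
        have hqS : q ∈ pvTree crown.1 crown.2 s := by
          rw [← hSeq]; exact (hperm.mem_iff).mpr hqP
        have hqy' : q.2 = crown.2 := by
          have : q.2 = cy0 := by simpa using hqy
          omega
        have := (htreey q hqS).2 hqy'
        rw [this] at hqx
        simpa using hqx.symm
      -- conclude B's membership conditions
      intro r hrlt j hjlt
      rw [hcx, hcy]
      apply hmemP
      rw [pvTree_mem]
      exact ⟨r, hrlt, j, hjlt, rfl⟩
    · -- B's membership conditions force P (hence S) to be the tree at (cx0, cy0);
      -- then the row ends are where A expects them
      intro hB
      have hsub : pvTree cx0 cy0 s ⊆ P := by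
        intro q hq
        rw [pvTree_mem] at hq
        obtain ⟨r, hrlt, j, hjlt, rfl⟩ := hq
        exact hB r hrlt j hjlt
      have hperm2 : (pvTree cx0 cy0 s).Perm P :=
        (List.subperm_of_subset (pvTree_nodup cx0 cy0 s) hsub).perm_of_length_le
          (by rw [pvTree_length]; omega)
      have hpermS : (crown :: rest).Perm (pvTree cx0 cy0 s) := hperm.trans hperm2.symm
      have hSeq : (crown :: rest) = pvTree cx0 cy0 s := by
        apply List.eq_of_perm_of_sorted
          (fun a b _ _ h1 h2 => absurd rfl (pvLlt_ne (pvLlt_trans h1 h2)))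
          hpair (pvTree_pairwise cx0 cy0 s) hpermS
      have hcrown : crown = (cx0, cy0) := by
        have h1 : (crown :: rest).getD 0 (0, 0) = crown := rfl
        have h2 := pvTree_getD cx0 cy0 s 0 0 (by omega) (by omega) (by omega)
        rw [← hSeq] at h2
        rw [h1] at h2
        simpa using h2
      intro r hr1 hr2
      have hi := hidx r hr1 hr2
      have g1 := pvTree_getD cx0 cy0 s r (r * r) hr2 (le_refl _) (by omega)
      have g2 := pvTree_getD cx0 cy0 s r (r * r + 2 * r) hr2 (by omega) (le_refl _)
      rw [← hSeq] at g1 g2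
      rw [show ((r * r - r * r : Nat) : Int) = 0 by omega] at g1
      rw [show ((r * r + 2 * r - r * r : Nat) : Int) = 2 * (r : Int) by omega] at g2
      constructor
      · rw [pvGet_conv _ _ (by omega) _, g1, hcrown]
        simp
      · rw [pvGet_conv _ _ hi _, g2, hcrown]
        have : cx0 - (r : Int) + 2 * (r : Int) = cx0 + r := by ring
        rw [this]
  · -- not a positive perfect square: both sides return false
    rw [if_neg hcond]
    have hBtrue : ((pvCsq dn : Int) = 0 ∨ (pvCsq dn : Int) * (pvCsq dn : Int) ≠ (dn : Int)) := by
      rcases Nat.eq_zero_or_pos dn with h0 | hpos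
      · left
        have : pvCsq dn = 0 := by unfold pvCsq; simp [h0]
        exact_mod_cast this
      · right
        intro hc
        have hc' : pvCsq dn * pvCsq dn = dn := by exact_mod_cast hc
        have hb := (pvSqrt_bounds dn).2
        apply hcond
        unfold pvCsq at hc'
        split_ifs at hc' with hsq
        · refine ⟨?_, hsq⟩
          by_contra hs0
          have : Nat.sqrt dn = 0 := by omega
          rw [this] at hsq
          omega
        · have h3 : (Nat.sqrt dn + 1) * (Nat.sqrt dn + 1)
              = Nat.sqrt dn * Nat.sqrt dn + 2 * Nat.sqrt dn + 1 := by ring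
          omega
    rw [if_pos hBtrue]

-- ===== VERDICT (by name: the statement is the Claim_ definition above) =====
theorem checkChristmasTreeShape_spec : Claim_equal_checkChristmasTreeShape := by
  intro robots _
  unfold Spec_checkChristmasTreeShape checkChristmasTreeShape checkChristmasTreeShape_alt
  exact pvCore (PySem.Set.ofList robots) (PySem.Set.nodup_ofList robots)
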